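-- pv_equiv track=rewrite | github.com/supersez/s | shuffle_playlist.py | riffle_shuffle
-- ===== SOURCE A (Python) =====
-- def riffle_shuffle(playlist):
--     cut = len(playlist) // 2
--     left, right = playlist[:cut], playlist[cut:]
--     shuffled = []
--     while left or right:
--         if left:
--             shuffled.append(left.pop(0))
--         if right:
--             shuffled.append(right.pop(0))
--     return shuffled
-- ===== SOURCE B (Python) =====
-- def riffle_shuffle(playlist):
--     n = len(playlist)
--     cut = n // 2
--     out = [playlist[i // 2] if i % 2 == 0 else playlist[cut + i // 2]
--            for i in range(2 * cut)]
--     return out + playlist[2 * cut:]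
-- ===== Notes on version B (the rewrite author's own statement) =====
-- stated objective: faster
-- what changed: Replaces the destructive while-loop with pop(0) on two sliced halves by a single non-mutating pass over output positions using closed-form source indices (even i -> playlist[i//2], odd i -> playlist[cut+i//2], trailing element copied directly).
import Mathlib
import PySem

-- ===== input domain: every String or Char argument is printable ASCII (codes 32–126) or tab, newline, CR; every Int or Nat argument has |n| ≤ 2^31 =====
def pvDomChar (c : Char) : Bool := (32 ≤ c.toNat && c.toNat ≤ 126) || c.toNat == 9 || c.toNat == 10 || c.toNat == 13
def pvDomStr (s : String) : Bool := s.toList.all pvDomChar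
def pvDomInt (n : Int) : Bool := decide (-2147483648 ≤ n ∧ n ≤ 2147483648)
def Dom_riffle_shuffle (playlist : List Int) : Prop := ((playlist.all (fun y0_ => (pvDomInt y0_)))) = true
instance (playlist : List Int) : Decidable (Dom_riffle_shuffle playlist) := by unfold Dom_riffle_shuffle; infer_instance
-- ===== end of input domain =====

-- B replaces A's destructive pop(0) while-loop over two sliced halves by one
-- non-mutating pass over output positions with closed-form source indices (faster: O(n) vs O(n^2)).


-- ===== PORT A =====
-- the while-loop: each iteration pops the head of left (if any) and of right (if any),
-- appending each to shuffled; stops when both are empty.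
def riffleLoop (left right shuffled : List Int) : List Int :=
  if left = [] ∧ right = [] then shuffled
  else
    let s1 := if left = [] then shuffled else shuffled ++ [left.headI]
    let l1 := left.tail
    let s2 := if right = [] then s1 else s1 ++ [right.headI]
    let r1 := right.tail
    riffleLoop l1 r1 s2
termination_by left.length + right.length
decreasing_by
  rename_i h
  rcases left with _ | ⟨a, l⟩ <;> rcases right with _ | ⟨b, r⟩ <;> simp_all <;> omega

-- playlist[:cut] / playlist[cut:] with 0 ≤ cut ≤ len are exactly take/drop
def riffle_shuffle (playlist : List Int) : List Int :=
  let cut := playlist.length / 2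
  let left := playlist.take cut
  let right := playlist.drop cut
  riffleLoop left right []

-- ===== PORT B =====
-- n = len(playlist) ≥ 0 and i ≥ 0, so Python's // and % coincide with Nat division/mod;
-- every index is in range, so getD never takes its default; playlist[2*cut:] = drop (2*cut)
def riffle_shuffle_alt (playlist : List Int) : List Int :=
  let n := playlist.length
  let cut := n / 2
  ((List.range (2 * cut)).map (fun i =>
      if i % 2 = 0 then playlist.getD (i / 2) 0 else playlist.getD (cut + i / 2) 0))
    ++ playlist.drop (2 * cut)

-- ===== PRECONDITION & SPEC =====
def Spec_riffle_shuffle (playlist : List Int) (out : List Int) : Prop := out = riffle_shuffle_alt playlist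
instance (playlist : List Int) (out : List Int) : Decidable (Spec_riffle_shuffle playlist out) := by unfold Spec_riffle_shuffle; infer_instance

-- ===== CLAIM (what is proved, stated in full; the proofs are below) =====
def Claim_equal_riffle_shuffle : Prop := ∀ (playlist : List Int), Dom_riffle_shuffle playlist → Spec_riffle_shuffle playlist (riffle_shuffle playlist)

-- ===== LEMMAS AND PROOFS =====

-- pairwise interleaving, remainder appended
def mix : List Int → List Int → List Int
  | [], r => r
  | l, [] => l
  | a :: l, b :: r => a :: b :: mix l r

theorem riffleLoop_eq_mix (left right shuffled : List Int) :
    riffleLoop left right shuffled = shuffled ++ mix left right := by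
  rcases left with _ | ⟨a, l⟩
  · rcases right with _ | ⟨b, r⟩
    · simp [riffleLoop, mix]
    · rw [riffleLoop]
      simp only [List.cons_ne_nil, and_false, if_neg, List.tail_cons,
        List.headI_cons, List.tail_nil, if_true, not_false_iff, mix]
      rw [riffleLoop_eq_mix [] r]
      cases r <;> simp [mix]
  · rcases right with _ | ⟨b, r⟩
    · rw [riffleLoop]
      simp only [List.cons_ne_nil, if_false, and_true, List.tail_cons,
        List.headI_cons, List.tail_nil, if_true, mix]
      rw [riffleLoop_eq_mix l []]
      cases l <;> simp [mix]
    · rw [riffleLoop]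
      simp only [List.cons_ne_nil, and_false, if_false, List.tail_cons,
        List.headI_cons, mix]
      rw [riffleLoop_eq_mix l r]
      simp
termination_by left.length + right.length
decreasing_by all_goals simp <;> omega

theorem map_range_two_mul (c : ℕ) (f : ℕ → Int) :
    (List.range (2 * c)).map f = (List.range c).flatMap (fun j => [f (2 * j), f (2 * j + 1)]) := by
  induction c with
  | zero => simp
  | succ c ih =>
    have : 2 * (c + 1) = (2 * c) + 1 + 1 := by ring
    rw [this, List.range_succ, List.range_succ, List.range_succ]
    simp [ih]

theorem flatMap_range_mix (l r : List Int) (h : l.length ≤ r.length) :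
    (List.range l.length).flatMap (fun j => [l.getD j 0, r.getD j 0]) ++ r.drop l.length
      = mix l r := by
  induction l generalizing r with
  | nil => simp [mix]
  | cons a l ih =>
    cases r with
    | nil => simp at h
    | cons b r =>
      rw [List.length_cons, List.range_succ_eq_map]
      simp only [List.flatMap_cons, List.flatMap_map, List.getD_cons_zero, List.drop_succ_cons]
      simp only [mix, List.cons_append]
      have := ih r (by simpa using h)
      simpa [List.flatMap, Function.comp] using this

theorem getD_take (p : List Int) (c j : ℕ) (hj : j < c) :
    (p.take c).getD j 0 = p.getD j 0 := by
  simp [List.getD_eq_getElem?_getD, hj]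

theorem getD_drop (p : List Int) (c j : ℕ) :
    (p.drop c).getD j 0 = p.getD (c + j) 0 := by
  simp [List.getD_eq_getElem?_getD, List.getElem?_drop]

theorem alt_eq_mix (p : List Int) :
    riffle_shuffle_alt p = mix (p.take (p.length / 2)) (p.drop (p.length / 2)) := by
  simp only [riffle_shuffle_alt]
  generalize hc : p.length / 2 = c
  rw [map_range_two_mul]
  have hstep : ∀ j ∈ List.range c,
      [if (2 * j) % 2 = 0 then p.getD ((2 * j) / 2) 0 else p.getD (c + (2 * j) / 2) 0,
       if (2 * j + 1) % 2 = 0 then p.getD ((2 * j + 1) / 2) 0 else p.getD (c + (2 * j + 1) / 2) 0]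
      = [(p.take c).getD j 0, (p.drop c).getD j 0] := by
    intro j hj
    simp only [List.mem_range] at hj
    have h2 : (2 * j) % 2 = 0 := by omega
    have h3 : (2 * j + 1) % 2 = 1 := by omega
    have h4 : (2 * j) / 2 = j := by omega
    have h5 : (2 * j + 1) / 2 = j := by omega
    rw [h2, h3, h4, h5]
    rw [getD_take p c j hj, getD_drop p c j]
    simp
  rw [List.flatMap_congr hstep]
  have hdrop2 : p.drop (2 * c) = (p.drop c).drop c := by
    rw [List.drop_drop]; congr 1; omega
  rw [hdrop2]
  have hle : (p.take c).length ≤ (p.drop c).length := by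
    simp; omega
  have := flatMap_range_mix (p.take c) (p.drop c) hle
  have hlt : (p.take c).length = c := by simp; omega
  rw [hlt] at this
  rw [this]

-- ===== VERDICT (by name: the statement is the Claim_ definition above) =====
theorem riffle_shuffle_spec : Claim_equal_riffle_shuffle := by
  intro playlist _
  unfold Spec_riffle_shuffle riffle_shuffle
  rw [riffleLoop_eq_mix, alt_eq_mix]
  simp
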